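-- pv_equiv track=rewrite | github.com/Ace1928/eidosian_forge | archive_forge/code/func_is_suppressed_warning.py | is_suppressed_warning
-- ===== SOURCE A (Python) =====
-- from typing import IO, TYPE_CHECKING, Any, Dict, Generator, List, Optional, Tuple, Type, Union
--
-- def is_suppressed_warning(type: str, subtype: str, suppress_warnings: List[str]) -> bool:
--     """Check whether the warning is suppressed or not."""
--     if type is None:
--         return False
--     subtarget: Optional[str]
--     for warning_type in suppress_warnings:
--         if '.' in warning_type:
--             target, subtarget = warning_type.split('.', 1)
--         else:
--             target, subtarget = (warning_type, None)
--         if target == type and subtarget in (None, subtype, '*'):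
--             return True
--     return False
-- ===== SOURCE B (Python) =====
-- def is_suppressed_warning(type: str, subtype: str, suppress_warnings):
--     """Check whether the warning is suppressed or not."""
--     # The target part of an entry never contains a dot, so a dotted type can never match.
--     if type is None or '.' in type:
--         return False
--     candidates = {type, f"{type}.{subtype}", f"{type}.*"}
--     return not candidates.isdisjoint(suppress_warnings)
-- ===== Notes on version B (the rewrite author's own statement) =====
-- stated objective: alternative
-- what changed: B never parses the suppress entries: it constructs the three exact entry strings that could suppress (type, subtype) — type, type+'.'+subtype, type+'.*' — and intersects that candidate set with the list (after an early False for a dotted type, whose target can never match), replacing A's per-entry split-and-compare scan.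
import Mathlib
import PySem

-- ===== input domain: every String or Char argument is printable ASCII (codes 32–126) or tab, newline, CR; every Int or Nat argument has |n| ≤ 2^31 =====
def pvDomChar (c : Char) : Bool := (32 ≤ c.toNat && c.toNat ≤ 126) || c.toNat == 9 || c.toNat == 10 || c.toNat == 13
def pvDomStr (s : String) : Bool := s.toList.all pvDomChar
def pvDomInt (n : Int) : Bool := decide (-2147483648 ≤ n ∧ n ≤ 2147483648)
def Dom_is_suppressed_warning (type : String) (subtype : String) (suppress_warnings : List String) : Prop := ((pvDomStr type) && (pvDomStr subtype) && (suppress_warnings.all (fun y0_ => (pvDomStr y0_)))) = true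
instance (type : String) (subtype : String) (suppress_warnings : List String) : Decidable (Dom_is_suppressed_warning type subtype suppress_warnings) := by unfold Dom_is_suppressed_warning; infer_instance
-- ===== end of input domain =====

-- B does not parse the entries at all: it builds the three candidate entry strings that could
-- suppress (type, subtype) and intersects them with the list (objective: alternative, same O(n)).

-- ===== PORT A =====
-- the for-loop over suppress_warnings with early return True
def pvLoopA (type subtype : String) : List String → Bool
  | [] => false
  | warning_type :: rest =>
    let ts : String × Option String :=
      if PySem.Str.isIn "." warning_type then
        -- warning_type.split('.', 1): '.' is present, so exactly two pieces
        let parts := (PySem.Str.splitMax? warning_type "." 1).getD []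
        (parts.getD 0 "", some (parts.getD 1 ""))
      else (warning_type, none)
    if ts.1 == type && (ts.2 == (none : Option String) || ts.2 == some subtype || ts.2 == some "*")
    then true
    else pvLoopA type subtype rest

def is_suppressed_warning (type : String) (subtype : String) (suppress_warnings : List String) : Bool :=
  -- 'if type is None: return False' cannot fire: type is a str here
  pvLoopA type subtype suppress_warnings

-- ===== PORT B =====
def is_suppressed_warning_alt (type : String) (subtype : String) (suppress_warnings : List String) : Bool :=
  -- 'type is None' cannot fire: type is a str here
  if PySem.Str.isIn "." type then false
  else
    let candidates : PySem.Set String :=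
      PySem.Set.ofList [type, type ++ "." ++ subtype, type ++ "." ++ "*"]
    !(PySem.Set.isdisjoint candidates suppress_warnings)

-- ===== PRECONDITION & SPEC =====
def Spec_is_suppressed_warning (type : String) (subtype : String) (suppress_warnings : List String) (out : Bool) : Prop := out = is_suppressed_warning_alt type subtype suppress_warnings
instance (type : String) (subtype : String) (suppress_warnings : List String) (out : Bool) : Decidable (Spec_is_suppressed_warning type subtype suppress_warnings out) := by unfold Spec_is_suppressed_warning; infer_instance

-- ===== CLAIM (what is proved, stated in full; the proofs are below) =====
def Claim_equal_is_suppressed_warning : Prop := ∀ (type : String) (subtype : String) (suppress_warnings : List String), Dom_is_suppressed_warning type subtype suppress_warnings → Spec_is_suppressed_warning type subtype suppress_warnings (is_suppressed_warning type subtype suppress_warnings)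

-- ===== LEMMAS AND PROOFS =====

-- A's per-entry test (split on '.', compare target, subtarget in (None, subtype, '*')), as a helper
def pvMatch (type subtype w : String) : Bool :=
  let ts : String × Option String :=
    if PySem.Str.isIn "." w then
      let parts := (PySem.Str.splitMax? w "." 1).getD []
      (parts.getD 0 "", some (parts.getD 1 ""))
    else (w, none)
  ts.1 == type && (ts.2 == (none : Option String) || ts.2 == some subtype || ts.2 == some "*")

lemma pv_singleton_infix_iff (a : Char) (l : List Char) : [a] <:+: l ↔ a ∈ l := by
  constructor
  · intro h; exact (List.singleton_sublist).1 h.sublist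
  · intro h
    obtain ⟨s, t, rfl⟩ := List.append_of_mem h
    exact ⟨s, t, by simp⟩

lemma pv_isIn_dot (s : String) : PySem.Str.isIn "." s = true ↔ '.' ∈ s.toList := by
  rw [show PySem.Str.isIn "." s = PySem.Chars.isIn ['.'] s.toList from by
        simpa using PySem.Str.isIn_eq "." s,
      PySem.Chars.isIn_iff_infix, pv_singleton_infix_iff]

lemma pv_go_zero (cs : List Char) (acc : List (List Char)) (fuel : Nat) :
    PySem.Chars.splitOnMax.go ['.'] fuel 0 cs [] acc = (cs :: acc).reverse := by
  cases fuel with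
  | zero => simp [PySem.Chars.splitOnMax.go]
  | succ f => cases cs <;> simp [PySem.Chars.splitOnMax.go]

lemma pv_go_one (cs : List Char) : ∀ (fuel : Nat) (cur : List Char) (acc : List (List Char)), cs.length < fuel →
    PySem.Chars.splitOnMax.go ['.'] fuel 1 cs cur acc =
      if '.' ∈ cs then
        acc.reverse ++ [cur.reverse ++ cs.takeWhile (· ≠ '.'), (cs.dropWhile (· ≠ '.')).tail]
      else acc.reverse ++ [cur.reverse ++ cs] := by
  induction cs with
  | nil =>
    intro fuel cur acc h
    cases fuel with
    | zero => omega
    | succ f => simp [PySem.Chars.splitOnMax.go]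
  | cons c rest ih =>
    intro fuel cur acc h
    cases fuel with
    | zero => omega
    | succ f =>
      by_cases hc : c = '.'
      · subst hc
        simp only [PySem.Chars.splitOnMax.go, if_neg (by omega : ¬ (1:Nat) = 0),
          List.isPrefixOf, beq_self_eq_true, Bool.and_eq_true, if_pos]
        rw [show ((1:Nat) - 1) = 0 from rfl]
        rw [show List.drop ['.'].length ('.' :: rest) = rest from rfl]
        rw [pv_go_zero]
        simp [List.takeWhile, List.dropWhile]
      · have hpre : ¬ (['.'].isPrefixOf (c :: rest) = true) := by
          simp [List.isPrefixOf]; exact fun h => absurd h.symm hc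
        simp only [PySem.Chars.splitOnMax.go, if_neg (by omega : ¬ (1:Nat) = 0), if_neg hpre]
        rw [ih f (c :: cur) acc (by simpa using Nat.lt_of_succ_lt_succ h)]
        simp only [List.takeWhile, List.dropWhile, hc, decide_not, List.reverse_cons]
        by_cases hm : '.' ∈ rest <;> simp [hm, hc, Ne.symm hc]

-- splitOnMax with sep '.' and maxsplit 1, characterised by takeWhile/dropWhile
lemma pv_splitMax_char (cs : List Char) :
    PySem.Chars.splitMax? cs ['.'] 1 =
      some (if '.' ∈ cs then
              [cs.takeWhile (· ≠ '.'), (cs.dropWhile (· ≠ '.')).tail]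
            else [cs]) := by
  simp only [PySem.Chars.splitMax?, PySem.Chars.splitOnMax]
  rw [if_neg (by norm_num), if_neg (by norm_num)]
  rw [show ((1:Int).toNat) = 1 from rfl, pv_go_one cs (cs.length + 1) [] [] (by omega)]
  by_cases h : '.' ∈ cs <;> simp [h]

lemma pv_takeWhile_of_append (a b : List Char) (ha : '.' ∉ a) :
    (a ++ '.' :: b).takeWhile (· ≠ '.') = a ∧ (a ++ '.' :: b).dropWhile (· ≠ '.') = '.' :: b := by
  induction a with
  | nil => simp [List.takeWhile, List.dropWhile]
  | cons x xs ih =>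
    have hx : x ≠ '.' := fun h => ha (by simp [h])
    have h2 := ih (fun h => ha (by simp [h]))
    simp only [List.takeWhile, List.dropWhile, ne_eq, decide_not] at h2 ⊢
    simp [hx, h2.1, h2.2]

-- the entry decomposition when '.' ∈ cs
lemma pv_decomp (cs : List Char) (h : '.' ∈ cs) :
    cs = cs.takeWhile (· ≠ '.') ++ '.' :: (cs.dropWhile (· ≠ '.')).tail ∧
    '.' ∉ cs.takeWhile (· ≠ '.') := by
  have hpre : '.' ∉ cs.takeWhile (· ≠ '.') := by
    intro hmem; simpa using List.mem_takeWhile_imp hmem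
  have hdne : cs.dropWhile (· ≠ '.') ≠ [] := by
    intro hnil
    have h2 := List.takeWhile_append_dropWhile (p := (· ≠ '.')) (l := cs)
    rw [hnil, List.append_nil] at h2
    exact hpre (by rw [h2]; exact h)
  refine ⟨?_, hpre⟩
  conv_lhs => rw [← List.takeWhile_append_dropWhile (p := (· ≠ '.')) (l := cs)]
  congr 1
  obtain ⟨y, ys, hys⟩ := List.exists_cons_of_ne_nil hdne
  have hy : y = '.' := by
    have := List.head?_dropWhile_not (p := (· ≠ '.')) (l := cs)
    rw [hys] at this
    simpa using this
  rw [hys, hy]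
  rfl

-- A's split of a dotted entry, at the String level
lemma pv_parts (entry : String) (h : '.' ∈ entry.toList) :
    PySem.Str.splitMax? entry "." 1 =
      some [String.ofList (entry.toList.takeWhile (· ≠ '.')),
            String.ofList ((entry.toList.dropWhile (· ≠ '.')).tail)] := by
  unfold PySem.Str.splitMax?
  rw [show (".".toList) = ['.'] from rfl, pv_splitMax_char, if_pos h]
  rfl

-- per-entry characterisation of A's match for a dot-free type
lemma pv_entry_match (type subtype entry : String) (ht : '.' ∉ type.toList) :
    pvMatch type subtype entry = true ↔
      (entry = type ∨ entry = type ++ "." ++ subtype ∨ entry = type ++ "." ++ "*") := by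
  unfold pvMatch
  by_cases hdot : '.' ∈ entry.toList
  · have hin : PySem.Str.isIn "." entry = true := (pv_isIn_dot entry).2 hdot
    obtain ⟨hdecomp, hpre⟩ := pv_decomp entry.toList hdot
    rw [hin, if_pos rfl]
    simp only [pv_parts entry hdot, Option.getD_some, List.getD_cons_zero, List.getD_cons_succ,
      Bool.and_eq_true, Bool.or_eq_true, beq_iff_eq, Option.some.injEq, reduceCtorEq, false_or]
    constructor
    · rintro ⟨h1, h2⟩
      have htl : entry.toList.takeWhile (· ≠ '.') = type.toList := by
        rw [← h1]; simp
      rcases h2 with h2 | h2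
      · right; left
        have hst : (entry.toList.dropWhile (· ≠ '.')).tail = subtype.toList := by
          rw [← h2]; simp
        apply String.toList_inj.1
        rw [hdecomp, htl, hst]; simp
      · right; right
        have hst : (entry.toList.dropWhile (· ≠ '.')).tail = ['*'] := by
          have h3 := congrArg String.toList h2
          simpa using h3
        apply String.toList_inj.1
        rw [hdecomp, htl, hst]
        simp
    · rintro (rfl | rfl | rfl)
      · exact absurd hdot ht
      · have he : (type ++ "." ++ subtype).toList = type.toList ++ '.' :: subtype.toList := by simp
        obtain ⟨hT, hD⟩ := pv_takeWhile_of_append type.toList subtype.toList ht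
        rw [he, hT, hD]
        simp
      · have he : (type ++ "." ++ "*").toList = type.toList ++ '.' :: ['*'] := by
          simp
        obtain ⟨hT, hD⟩ := pv_takeWhile_of_append type.toList ['*'] ht
        rw [he, hT, hD]
        simp
  · have hin : PySem.Str.isIn "." entry = false := by
      rw [← Bool.not_eq_true, pv_isIn_dot]; exact hdot
    simp only [hin, Bool.false_eq_true, reduceIte, Bool.and_eq_true, Bool.or_eq_true, beq_iff_eq,
      Option.some.injEq, reduceCtorEq, or_false, false_or, and_true]
    constructor
    · rintro rfl; exact Or.inl rfl
    · rintro (rfl | rfl | rfl)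
      · rfl
      · exact absurd (by simp : '.' ∈ (type ++ "." ++ subtype).toList) hdot
      · exact absurd (show '.' ∈ (type ++ "." ++ "*").toList by simp) hdot

-- for a dotted type nothing matches: no target ever contains a dot
lemma pv_entry_match_dotted (type subtype entry : String) (ht : '.' ∈ type.toList) :
    pvMatch type subtype entry = false := by
  unfold pvMatch
  by_cases hdot : '.' ∈ entry.toList
  · have hin : PySem.Str.isIn "." entry = true := (pv_isIn_dot entry).2 hdot
    obtain ⟨_, hpre⟩ := pv_decomp entry.toList hdot
    rw [hin, if_pos rfl]
    simp only [pv_parts entry hdot, Option.getD_some, List.getD_cons_zero, Bool.and_eq_false_iff]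
    left
    rw [beq_eq_false_iff_ne]
    intro h
    apply hpre
    rw [show entry.toList.takeWhile (· ≠ '.') = type.toList from by rw [← h]; simp]
    exact ht
  · have hin : PySem.Str.isIn "." entry = false := by
      rw [← Bool.not_eq_true, pv_isIn_dot]; exact hdot
    simp only [hin, Bool.false_eq_true, reduceIte, Bool.and_eq_false_iff]
    left
    rw [beq_eq_false_iff_ne]
    rintro rfl
    exact hdot ht

lemma pvLoopA_eq_any (type subtype : String) (sw : List String) :
    pvLoopA type subtype sw = sw.any (pvMatch type subtype) := by
  induction sw with
  | nil => rfl
  | cons w rest ih =>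
    show (if pvMatch type subtype w then true else pvLoopA type subtype rest) = _
    rw [List.any_cons, ih]
    cases pvMatch type subtype w <;> simp

-- ===== VERDICT (by name: the statement is the Claim_ definition above) =====
theorem is_suppressed_warning_spec : Claim_equal_is_suppressed_warning := by
  intro type subtype sw _
  unfold Spec_is_suppressed_warning is_suppressed_warning is_suppressed_warning_alt
  rw [pvLoopA_eq_any]
  by_cases ht : '.' ∈ type.toList
  · rw [if_pos ((pv_isIn_dot type).2 ht)]
    rw [List.any_eq_false]
    intro w _
    simp [pv_entry_match_dotted type subtype w ht]
  · rw [if_neg (fun h => ht ((pv_isIn_dot type).1 h))]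
    rw [Bool.eq_iff_iff, List.any_eq_true, Bool.not_eq_true', ← Bool.not_eq_true,
      PySem.Set.isdisjoint_iff]
    push_neg
    constructor
    · rintro ⟨w, hw, hm⟩
      rcases (pv_entry_match type subtype w ht).1 hm with h | h | h
      · exact ⟨w, (PySem.Set.mem_ofList _ _).2 (by simp [h]), hw⟩
      · exact ⟨w, (PySem.Set.mem_ofList _ _).2 (by simp [h]), hw⟩
      · exact ⟨w, (PySem.Set.mem_ofList _ _).2 (by simp [h]), hw⟩
    · rintro ⟨c, hc, hcsw⟩
      refine ⟨c, hcsw, (pv_entry_match type subtype c ht).2 ?_⟩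
      simpa using (PySem.Set.mem_ofList _ _).1 hc
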